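-- pv_equiv track=rewrite | github.com/owen1050/RumikubTools | runsWithArrayGUI.py | translateDeck
-- ===== SOURCE A (Python) =====
-- indexToCard = ["bl1","bl2","bl3","bl4","bl5","bl6","bl7","bl8","bl9","bl10","bl11","bl12","bl13","bk1","bk2","bk3","bk4","bk5","bk6","bk7","bk8","bk9","bk10","bk11","bk12","bk13","or1","or2","or3","or4","or5","or6","or7","or8","or9","or10","or11","or12","or13","re1","re2","re3","re4","re5","re6","re7","re8","re9","re10","re11","re12","re13"]
--
-- def translateDeck(deck):
--     if(deck == 0):
--         return "No solution"
--     ret = []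
--     for d in deck:
--         temp = []
--         for c in d:
--             temp.append(indexToCard[c])
--         ret.append(temp)
--     return ret
-- ===== SOURCE B (Python) =====
-- def translateDeck(deck):
--     if deck == 0:
--         return "No solution"
--     colors = ["bl", "bk", "or", "re"]
--     flat = [colors[c // 13] + str(c % 13 + 1) for row in deck for c in row]
--     out = []
--     i = 0
--     for row in deck:
--         out.append(flat[i:i + len(row)])
--         i += len(row)
--     return out
-- ===== Notes on version B (the rewrite author's own statement) =====
-- stated objective: alternative
-- what changed: B drops the 52-entry indexToCard table and the nested append loops: it flattens the deck, translates every card in one pass by the arithmetic formula colors[c//13]+str(c%13+1), and then reassembles the rows by slicing the flat result with a running offset.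
import Mathlib
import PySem

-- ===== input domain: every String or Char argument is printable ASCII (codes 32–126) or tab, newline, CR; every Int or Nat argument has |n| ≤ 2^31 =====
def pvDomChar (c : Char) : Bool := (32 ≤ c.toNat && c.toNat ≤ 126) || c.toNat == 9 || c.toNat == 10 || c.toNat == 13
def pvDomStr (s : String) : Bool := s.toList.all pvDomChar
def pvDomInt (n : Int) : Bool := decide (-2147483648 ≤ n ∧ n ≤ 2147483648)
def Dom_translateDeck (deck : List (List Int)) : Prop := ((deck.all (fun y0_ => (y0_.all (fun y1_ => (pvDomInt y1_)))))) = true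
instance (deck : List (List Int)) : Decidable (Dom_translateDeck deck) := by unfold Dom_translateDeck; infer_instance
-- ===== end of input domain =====

-- B flattens the deck, translates all cards in one arithmetic pass (no 52-entry
-- table), and reassembles the rows by slicing with a running offset (alternative
-- decomposition, same cost). Python's untyped 'deck == 0' → "No solution" branch
-- (a str, not a list of lists of str) is unrepresentable under the List type and
-- is reproduced by B in Python but absent from both ports.

-- ===== PORT A =====
def indexToCard : List String := ["bl1","bl2","bl3","bl4","bl5","bl6","bl7","bl8","bl9","bl10","bl11","bl12","bl13","bk1","bk2","bk3","bk4","bk5","bk6","bk7","bk8","bk9","bk10","bk11","bk12","bk13","or1","or2","or3","or4","or5","or6","or7","or8","or9","or10","or11","or12","or13","re1","re2","re3","re4","re5","re6","re7","re8","re9","re10","re11","re12","re13"]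

-- indexToCard[c] : Python indexing (negative wrap, IndexError → none, excluded by Pre_)
def translateDeck (deck : List (List Int)) : List (List String) :=
  deck.foldl (fun ret d =>
    ret ++ [d.foldl (fun temp c => temp ++ [(PySem.List.pyGet? indexToCard c).getD ""]) []]) []

-- ===== PORT B =====
def pvColors : List String := ["bl", "bk", "or", "re"]

-- colors[c // 13] + str(c % 13 + 1)  (Python floor division / modulo and indexing)
def pvCardName (c : Int) : String :=
  (PySem.List.pyGet? pvColors (PySem.Int.floordiv c 13)).getD "" ++ PySem.Int.toStr (PySem.Int.mod c 13 + 1)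

-- flat = one translated pass over the flattened deck; rows rebuilt by slicing flat
def translateDeck_alt (deck : List (List Int)) : List (List String) :=
  let flat : List String := deck.flatMap (fun row => row.map pvCardName)
  (deck.foldl (fun (p : List (List String) × Int) row =>
      (p.1 ++ [PySem.List.slice flat (some p.2) (some (p.2 + (row.length : Int)))],
       p.2 + (row.length : Int))) ([], 0)).1

-- ===== PRECONDITION & SPEC =====
-- Pre_ excludes exactly the inputs on which Python A raises IndexError
-- (some card index outside the 52-card wrap range [-52, 52)).
def Pre_translateDeck (deck : List (List Int)) : Prop :=
  ∀ d ∈ deck, ∀ c ∈ d, -52 ≤ c ∧ c < 52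
instance (deck : List (List Int)) : Decidable (Pre_translateDeck deck) := by
  unfold Pre_translateDeck; infer_instance

def pvWitness_translateDeck : List (List Int) := [[0, 12, 13, 51, -1, -52], []]

def Spec_translateDeck (deck : List (List Int)) (out : List (List String)) : Prop := out = translateDeck_alt deck
instance (deck : List (List Int)) (out : List (List String)) : Decidable (Spec_translateDeck deck out) := by unfold Spec_translateDeck; infer_instance

-- ===== CLAIM =====
def Claim_equal_translateDeck : Prop := ∀ (deck : List (List Int)), Dom_translateDeck deck → Pre_translateDeck deck → Spec_translateDeck deck (translateDeck deck)

-- ===== LEMMAS AND PROOFS =====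

set_option maxRecDepth 4000 in
theorem pvCard_eq_fin : ∀ n : Fin 104,
    (PySem.List.pyGet? indexToCard ((n : Int) - 52)).getD "" = pvCardName ((n : Int) - 52) := by
  decide

theorem pvCard_eq (c : Int) (h1 : -52 ≤ c) (h2 : c < 52) :
    (PySem.List.pyGet? indexToCard c).getD "" = pvCardName c := by
  have hn : ((⟨(c + 52).toNat, by omega⟩ : Fin 104) : Int) - 52 = c := by
    simp; omega
  have := pvCard_eq_fin ⟨(c + 52).toNat, by omega⟩
  rwa [hn] at this

theorem foldl_app_map {α β : Type} (f : α → β) :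
    ∀ (l : List α) (acc : List β),
      l.foldl (fun temp c => temp ++ [f c]) acc = acc ++ l.map f := by
  intro l
  induction l with
  | nil => simp
  | cons x xs ih => intro acc; simp [ih]

-- invariant of B's reassembly fold: at offset i the rest of flat is the translated rest
theorem regroup_inv (flat : List String) :
    ∀ (rows : List (List Int)) (acc : List (List String)) (i : ℕ),
      flat.drop i = rows.flatMap (fun r => r.map pvCardName) →
      (rows.foldl (fun (p : List (List String) × Int) row =>
          (p.1 ++ [PySem.List.slice flat (some p.2) (some (p.2 + (row.length : Int)))],
           p.2 + (row.length : Int))) (acc, (i : Int))).1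
        = acc ++ rows.map (fun r => r.map pvCardName) := by
  intro rows
  induction rows with
  | nil => intro acc i _; simp
  | cons row rest ih =>
    intro acc i h
    have hslice : PySem.List.slice flat (some (i : Int)) (some ((i : Int) + (row.length : Int)))
        = row.map pvCardName := by
      rw [PySem.List.slice_natCast_add, h]
      simp
    have hdrop : flat.drop (i + row.length) = rest.flatMap (fun r => r.map pvCardName) := by
      rw [← List.drop_drop, h]
      simp
    simp only [List.foldl_cons, hslice]
    have hcast : (i : Int) + (row.length : Int) = ((i + row.length : ℕ) : Int) := by push_cast; ring
    rw [hcast, ih (acc ++ [row.map pvCardName]) (i + row.length) hdrop]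
    simp

theorem alt_eq_map (deck : List (List Int)) :
    translateDeck_alt deck = deck.map (fun r => r.map pvCardName) := by
  unfold translateDeck_alt
  have := regroup_inv (deck.flatMap (fun r => r.map pvCardName)) deck [] 0 (by simp)
  simpa using this

-- ===== VERDICT =====
theorem translateDeck_spec : Claim_equal_translateDeck := by
  intro deck _ hpre
  unfold Spec_translateDeck translateDeck
  rw [alt_eq_map, foldl_app_map]
  simp only [List.nil_append]
  refine List.map_congr_left (fun d hd => ?_)
  rw [foldl_app_map]
  simp only [List.nil_append]
  exact List.map_congr_left (fun c hc => pvCard_eq c (hpre d hd c hc).1 (hpre d hd c hc).2)
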